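-- pv_equiv track=rewrite | github.com/3-stardust-7/FridgePal | backend/services/food_inference.py | categorize_by_urgency
-- ===== SOURCE A (Python) =====
-- from typing import Optional, List, Dict
--
-- def categorize_by_urgency(items: List[Dict]) -> Dict[str, List]:
--     """
--     Categorize items by expiry urgency
--
--     Args:
--         items: List of inventory items with expiry
--
--     Returns:
--         Dictionary with urgency categories
--     """
--     urgent = []      # Expires in 3 days or less
--     soon = []        # Expires in 7 days or less
--     normal = []      # Expires in more than 7 days
--
--     for item in items:
--         expiry = item.get("estimated_expiry_days", 7)
--
--         if expiry <= 3:
--             urgent.append(item)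
--         elif expiry <= 7:
--             soon.append(item)
--         else:
--             normal.append(item)
--
--     return {
--         "urgent": urgent,
--         "soon": soon,
--         "normal": normal
--     }
-- ===== SOURCE B (Python) =====
-- def categorize_by_urgency(items):
--     expiry = lambda item: item.get("estimated_expiry_days", 7)
--     return {
--         "urgent": [item for item in items if expiry(item) <= 3],
--         "soon": [item for item in items if 3 < expiry(item) <= 7],
--         "normal": [item for item in items if expiry(item) > 7],
--     }
-- ===== Notes on version B (the rewrite author's own statement) =====
-- stated objective: idiomatic
-- what changed: Replaces A's single accumulator loop with three independent list comprehensions, each filtering the whole list by an explicit expiry-range predicate (<=3, 3<..<=7, >7).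
import Mathlib
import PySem

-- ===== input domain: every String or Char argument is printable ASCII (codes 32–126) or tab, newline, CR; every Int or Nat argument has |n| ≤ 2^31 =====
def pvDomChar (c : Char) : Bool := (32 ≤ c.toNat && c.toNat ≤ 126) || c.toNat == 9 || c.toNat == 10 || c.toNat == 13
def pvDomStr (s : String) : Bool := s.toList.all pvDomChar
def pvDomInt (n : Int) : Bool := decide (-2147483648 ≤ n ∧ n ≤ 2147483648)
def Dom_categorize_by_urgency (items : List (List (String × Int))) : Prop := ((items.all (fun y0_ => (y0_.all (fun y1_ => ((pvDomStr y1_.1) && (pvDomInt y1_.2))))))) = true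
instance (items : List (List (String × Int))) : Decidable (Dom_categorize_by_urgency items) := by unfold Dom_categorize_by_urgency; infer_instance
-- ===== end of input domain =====

-- B replaces A's single if/elif/else accumulation pass by three independent filters of the
-- whole list with explicit range predicates (idiomatic; same O(n) cost, three scans).

-- ===== PORT A =====
-- item.get("estimated_expiry_days", 7) on a dict item
def pvExpiryA (item : List (String × Int)) : Int :=
  (PySem.Dict.mk item).getD "estimated_expiry_days" 7

def categorize_by_urgency (items : List (List (String × Int))) : List (String × List (List (String × Int))) :=
  let s := items.foldl
    (fun (acc : List (List (String × Int)) × List (List (String × Int)) × List (List (String × Int))) item =>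
      let expiry := pvExpiryA item
      if expiry ≤ 3 then (acc.1 ++ [item], acc.2.1, acc.2.2)
      else if expiry ≤ 7 then (acc.1, acc.2.1 ++ [item], acc.2.2)
      else (acc.1, acc.2.1, acc.2.2 ++ [item]))
    ([], [], [])
  [("urgent", s.1), ("soon", s.2.1), ("normal", s.2.2)]

-- ===== PORT B =====
-- expiry = lambda item: item.get("estimated_expiry_days", 7), inlined at each use as in Source B
def categorize_by_urgency_alt (items : List (List (String × Int))) : List (String × List (List (String × Int))) :=
  [("urgent", items.filter (fun item => (PySem.Dict.mk item).getD "estimated_expiry_days" 7 ≤ 3)),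
   ("soon",   items.filter (fun item => 3 < (PySem.Dict.mk item).getD "estimated_expiry_days" 7 ∧ (PySem.Dict.mk item).getD "estimated_expiry_days" 7 ≤ 7)),
   ("normal", items.filter (fun item => 7 < (PySem.Dict.mk item).getD "estimated_expiry_days" 7))]

-- ===== PRECONDITION & SPEC =====
def Spec_categorize_by_urgency (items : List (List (String × Int))) (out : List (String × List (List (String × Int)))) : Prop := out = categorize_by_urgency_alt items
instance (items : List (List (String × Int))) (out : List (String × List (List (String × Int)))) : Decidable (Spec_categorize_by_urgency items out) := by unfold Spec_categorize_by_urgency; infer_instance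

-- ===== CLAIM (what is proved, stated in full; the proofs are below) =====
def Claim_equal_categorize_by_urgency : Prop := ∀ (items : List (List (String × Int))), Dom_categorize_by_urgency items → Spec_categorize_by_urgency items (categorize_by_urgency items)

-- ===== LEMMAS AND PROOFS =====
theorem categorize_foldl_inv (items : List (List (String × Int)))
    (u s n : List (List (String × Int))) :
    items.foldl
      (fun (acc : List (List (String × Int)) × List (List (String × Int)) × List (List (String × Int))) item =>
        let expiry := pvExpiryA item
        if expiry ≤ 3 then (acc.1 ++ [item], acc.2.1, acc.2.2)
        else if expiry ≤ 7 then (acc.1, acc.2.1 ++ [item], acc.2.2)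
        else (acc.1, acc.2.1, acc.2.2 ++ [item])) (u, s, n)
    = (u ++ items.filter (fun item => pvExpiryA item ≤ 3),
       s ++ items.filter (fun item => decide (3 < pvExpiryA item) && decide (pvExpiryA item ≤ 7)),
       n ++ items.filter (fun item => 7 < pvExpiryA item)) := by
  induction items generalizing u s n with
  | nil => simp
  | cons hd tl ih =>
    simp only [List.foldl_cons, List.filter_cons]
    by_cases h3 : pvExpiryA hd ≤ 3
    · simp only [h3, if_pos, ih]
      have h3' : ¬ (3 : Int) < pvExpiryA hd := by omega
      have h7 : pvExpiryA hd ≤ 7 := by omega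
      simp [h3', h7]
    · by_cases h7 : pvExpiryA hd ≤ 7
      · have h3' : (3 : Int) < pvExpiryA hd := by omega
        have h7' : ¬ (7 : Int) < pvExpiryA hd := by omega
        simp only [if_neg h3, if_pos h7, ih]
        simp [h3, h3', h7, h7']
      · have h7' : (7 : Int) < pvExpiryA hd := by omega
        simp only [if_neg h3, if_neg h7, ih]
        simp [h3, h7, h7']

-- ===== VERDICT (by name: the statement is the Claim_ definition above) =====
theorem categorize_by_urgency_spec : Claim_equal_categorize_by_urgency := by
  intro items _
  unfold Spec_categorize_by_urgency categorize_by_urgency categorize_by_urgency_alt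
  rw [categorize_foldl_inv]
  simp only [pvExpiryA, PySem.Dict.mk, List.cons.injEq, Prod.mk.injEq, and_true, true_and,
    List.nil_append]
  refine ⟨rfl, ?_, rfl⟩
  apply List.filter_congr
  intro item _
  exact (Bool.decide_and _ _).symm
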